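-- pv_equiv track=rewrite | github.com/intentionally-left-blank/Amaryllis | agents/factory.py | _source_target_from_domain
-- ===== SOURCE A (Python) =====
-- _SOURCE_DOMAIN_PREFIXES: tuple[tuple[str, str], ...] = (
--     ("reddit.com", "reddit"),
--     ("x.com", "twitter"),
--     ("twitter.com", "twitter"),
--     ("news.ycombinator.com", "hackernews"),
--     ("arxiv.org", "arxiv"),
--     ("github.com", "github"),
-- )
--
-- def _source_target_from_domain(domain: str) -> str:
--     normalized = str(domain or "").strip().lower()
--     if not normalized:
--         return "web"
--     for suffix, source in _SOURCE_DOMAIN_PREFIXES: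
--         if normalized == suffix or normalized.endswith(f".{suffix}"):
--             return source
--     return "web"
-- ===== SOURCE B (Python) =====
-- _SOURCE_DOMAIN_PREFIXES: tuple[tuple[str, str], ...] = (
--     ("reddit.com", "reddit"),
--     ("x.com", "twitter"),
--     ("twitter.com", "twitter"),
--     ("news.ycombinator.com", "hackernews"),
--     ("arxiv.org", "arxiv"),
--     ("github.com", "github"),
-- )
--
-- _SOURCE_BY_SUFFIX: dict[str, str] = dict(_SOURCE_DOMAIN_PREFIXES)
--
--
-- def _source_target_from_domain(domain: str) -> str:
--     rest = str(domain or "").strip().lower()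
--     while rest:
--         hit = _SOURCE_BY_SUFFIX.get(rest)
--         if hit is not None:
--             return hit
--         dot = rest.find(".")
--         if dot == -1:
--             break
--         rest = rest[dot + 1:]
--     return "web"
-- ===== Notes on version B (the rewrite author's own statement) =====
-- stated objective: alternative
-- what changed: Instead of scanning the 6-entry table and testing ==/endswith per entry, B builds a dict keyed by suffix once and walks the normalized domain left-to-right, dropping one label at a time and looking each label-boundary suffix up in the dict.
import Mathlib
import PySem

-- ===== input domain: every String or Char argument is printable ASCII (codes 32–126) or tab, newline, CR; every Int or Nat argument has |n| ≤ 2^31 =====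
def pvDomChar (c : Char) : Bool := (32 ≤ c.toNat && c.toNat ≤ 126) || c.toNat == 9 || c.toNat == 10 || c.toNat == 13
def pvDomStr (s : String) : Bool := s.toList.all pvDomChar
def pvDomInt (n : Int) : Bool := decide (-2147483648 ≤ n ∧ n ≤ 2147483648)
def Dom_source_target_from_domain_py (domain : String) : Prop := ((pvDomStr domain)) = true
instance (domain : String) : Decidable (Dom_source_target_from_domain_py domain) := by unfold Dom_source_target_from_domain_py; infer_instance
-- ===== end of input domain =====

-- B replaces A's table scan with ==/endswith tests by a dict keyed by suffix and a
-- left-to-right walk over the normalized domain dropping one label at a time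
-- (alternative decomposition; same observable behaviour).

-- ===== PORT A =====
-- _SOURCE_DOMAIN_PREFIXES, keys as List Char
def stfdTable : List (List Char × String) :=
  [("reddit.com".toList, "reddit"),
   ("x.com".toList, "twitter"),
   ("twitter.com".toList, "twitter"),
   ("news.ycombinator.com".toList, "hackernews"),
   ("arxiv.org".toList, "arxiv"),
   ("github.com".toList, "github")]

-- the 'for suffix, source in _SOURCE_DOMAIN_PREFIXES' loop of A
def stfdLoopA : List (List Char × String) → List Char → String
  | [], _ => "web"
  | (suffix, source) :: tbl, n =>
      if n == suffix || PySem.Chars.endswith n ('.' :: suffix) then source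
      else stfdLoopA tbl n

def source_target_from_domain_py (domain : String) : String :=
  let normalized := PySem.Chars.lower (PySem.Chars.strip domain.toList)
  if normalized = [] then "web" else stfdLoopA stfdTable normalized

-- ===== PORT B =====
-- _SOURCE_BY_SUFFIX = dict(_SOURCE_DOMAIN_PREFIXES)
def stfdDict : PySem.Dict (List Char) String := PySem.Dict.ofList stfdTable

-- the 'while rest:' loop of B: dict lookup, else drop the leftmost label
-- (fuel only makes the recursion structural; one unit per dropped label suffices)
def stfdLoopB : Nat → List Char → String
  | 0, _ => "web"
  | fuel + 1, rest =>
    if rest = [] then "web"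
    else
      match PySem.Dict.get? stfdDict rest with
      | some hit => hit
      | none =>
        let dot := PySem.Chars.find rest ['.']
        if dot = -1 then "web"
        else stfdLoopB fuel (PySem.List.slice rest (some (dot + 1)) none)

def source_target_from_domain_py_alt (domain : String) : String :=
  let normalized := PySem.Chars.lower (PySem.Chars.strip domain.toList)
  stfdLoopB (normalized.length + 1) normalized

-- ===== PRECONDITION & SPEC =====
def Spec_source_target_from_domain_py (domain : String) (out : String) : Prop := out = source_target_from_domain_py_alt domain
instance (domain : String) (out : String) : Decidable (Spec_source_target_from_domain_py domain out) := by unfold Spec_source_target_from_domain_py; infer_instance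

-- ===== CLAIM (what is proved, stated in full; the proofs are below) =====
def Claim_equal_source_target_from_domain_py : Prop := ∀ (domain : String), Dom_source_target_from_domain_py domain → Spec_source_target_from_domain_py domain (source_target_from_domain_py domain)

-- ===== LEMMAS AND PROOFS =====

-- the condition A tests for one table entry, as a Prop
def stfdMatch (n k : List Char) : Prop := n = k ∨ ('.' :: k) <:+ n

theorem stfdCond_iff (n k : List Char) :
    (n == k || PySem.Chars.endswith n ('.' :: k)) = true ↔ stfdMatch n k := by
  simp [stfdMatch, PySem.Chars.endswith_iff]

theorem stfdLoopA_eq_web (tbl : List (List Char × String)) (n : List Char)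
    (h : ∀ p ∈ tbl, ¬ stfdMatch n p.1) : stfdLoopA tbl n = "web" := by
  induction tbl with
  | nil => rfl
  | cons p tbl ih =>
      obtain ⟨suffix, source⟩ := p
      rw [stfdLoopA, if_neg]
      · exact ih fun q hq => h q (List.mem_cons_of_mem _ hq)
      · intro hc
        exact h _ (List.mem_cons_self ..) ((stfdCond_iff n suffix).mp hc)

theorem stfdLoopA_congr (tbl : List (List Char × String)) (n m : List Char)
    (h : ∀ p ∈ tbl, stfdMatch n p.1 ↔ stfdMatch m p.1) :
    stfdLoopA tbl n = stfdLoopA tbl m := by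
  induction tbl with
  | nil => rfl
  | cons p tbl ih =>
      obtain ⟨suffix, source⟩ := p
      rw [stfdLoopA, stfdLoopA]
      have hiff := (stfdCond_iff n suffix).trans
        ((h _ (List.mem_cons_self ..)).trans (stfdCond_iff m suffix).symm)
      by_cases hc : (n == suffix || PySem.Chars.endswith n ('.' :: suffix)) = true
      · rw [if_pos hc, if_pos (hiff.mp hc)]
      · rw [if_neg hc, if_neg (fun hm => hc (hiff.mpr hm))]
        exact ih fun q hq => h q (List.mem_cons_of_mem _ hq)

-- a successful dict lookup pins n to one of the six table entries
theorem stfd_get?_some (n : List Char) (v : String)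
    (h : PySem.Dict.get? stfdDict n = some v) : (n, v) ∈ stfdTable := by
  have hit : stfdDict.items = stfdTable := by decide
  have := PySem.Dict.mem_items_of_get?_eq_some stfdDict h
  rwa [hit] at this

-- a failed lookup says n is none of the keys
theorem stfd_get?_none (n : List Char)
    (h : PySem.Dict.get? stfdDict n = none) : ∀ p ∈ stfdTable, n ≠ p.1 := by
  intro p hp hne
  subst hne
  have hc : stfdDict.contains p.1 = false := by
    rw [PySem.Dict.contains_eq_isSome_get?, h]
    rfl
  fin_cases hp <;> exact absurd hc (by decide)

-- at a key n, A's loop returns exactly the table's value for n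
theorem stfdLoopA_at_key (n : List Char) (v : String) (hmem : (n, v) ∈ stfdTable) :
    stfdLoopA stfdTable n = v := by
  fin_cases hmem <;> decide

-- A's match condition is invariant under dropping the leading dot-free label
theorem stfdMatch_drop_label (pre rest k : List Char)
    (hpre : '.' ∉ pre) (hne : pre ++ '.' :: rest ≠ k) :
    stfdMatch (pre ++ '.' :: rest) k ↔ stfdMatch rest k := by
  have hsub : ('.' :: rest) <:+ (pre ++ '.' :: rest) :=
    List.suffix_append_of_suffix (List.suffix_refl _)
  constructor
  · rintro (h | h)
    · exact absurd h hne
    · rcases le_or_gt ('.' :: k).length ('.' :: rest).length with hle | hgt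
      · have h2 : ('.' :: k) <:+ ('.' :: rest) := List.suffix_of_suffix_length_le h hsub hle
        rcases List.suffix_cons_iff.mp h2 with heq | h3
        · left
          injection heq with _ h'
          exact h'.symm
        · right; exact h3
      · exfalso
        have h2 : ('.' :: rest) <:+ ('.' :: k) :=
          List.suffix_of_suffix_length_le hsub h (le_of_lt hgt)
        obtain ⟨w, hw⟩ := h2
        obtain ⟨u, hu⟩ := h
        have hwne : w ≠ [] := by
          intro h0
          rw [h0, List.nil_append] at hw
          simp only [List.length_cons] at hgt
          have := congrArg List.length hw
          simp at this
          omega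
        have heq : pre ++ '.' :: rest = (u ++ w) ++ '.' :: rest := by
          rw [List.append_assoc, hw, hu]
        have hpreq : pre = u ++ w := List.append_cancel_right heq
        have hdot : '.' ∈ w := by
          cases w with
          | nil => exact absurd rfl hwne
          | cons c w' =>
              rw [List.cons_append] at hw
              have hc : c = '.' := by injection hw
              simp [hc]
        exact hpre (hpreq ▸ List.mem_append_right u hdot)
  · rintro (h | h)
    · right
      subst h
      exact hsub
    · right
      exact h.trans ((List.suffix_cons '.' rest).trans hsub)

-- n around its first dot, when find succeeds
theorem stfd_find_split (n : List Char) (h : PySem.Chars.find n ['.'] ≠ -1) :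
    n = n.take (PySem.Chars.find n ['.']).toNat
        ++ '.' :: n.drop ((PySem.Chars.find n ['.']).toNat + 1)
      ∧ '.' ∉ n.take (PySem.Chars.find n ['.']).toNat
      ∧ (PySem.Chars.find n ['.']).toNat < n.length := by
  have h0 : 0 ≤ PySem.Chars.find n ['.'] := by
    have := PySem.Chars.neg_one_le_find n ['.']
    omega
  obtain ⟨hpref, hmin⟩ := PySem.Chars.find_spec (s := n) (sub := ['.']) h0
  set d := (PySem.Chars.find n ['.']).toNat with hdef
  obtain ⟨t, ht⟩ := hpref
  have h1 : n.drop d = '.' :: t := ht.symm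
  have hd : d < n.length := by
    have := congrArg List.length h1
    simp [List.length_drop] at this
    omega
  have h2 : n.drop (d + 1) = t := by
    have : (n.drop d).drop 1 = n.drop (d + 1) := by
      rw [List.drop_drop]
    rw [← this, h1]
    rfl
  refine ⟨?_, ?_, hd⟩
  · rw [h2, ← h1, List.take_append_drop]
  · intro hmem
    obtain ⟨i, hi, hgi⟩ := List.mem_iff_getElem.mp hmem
    have hlen : i < d ∧ i < n.length := by
      simpa [List.length_take] using hi
    obtain ⟨hilt, hin⟩ := hlen
    apply hmin i hilt
    refine ⟨n.drop (i + 1), ?_⟩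
    rw [List.getElem_take] at hgi
    rw [List.drop_eq_getElem_cons hin, hgi]
    rfl

-- main loop equivalence, by induction on the fuel
theorem stfdLoop_eq (fuel : Nat) :
    ∀ n : List Char, n.length < fuel → stfdLoopB fuel n = stfdLoopA stfdTable n := by
  induction fuel with
  | zero => exact fun n h => absurd h (by omega)
  | succ fuel ih =>
  intro n hfuel
  by_cases hnil : n = []
  · subst hnil
    rw [stfdLoopB, if_pos rfl]
    decide
  rw [stfdLoopB, if_neg hnil]
  cases hget : PySem.Dict.get? stfdDict n with
  | some v =>
      exact (stfdLoopA_at_key n v (stfd_get?_some n v hget)).symm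
  | none =>
      have hnk := stfd_get?_none n hget
      simp only
      by_cases hdot : PySem.Chars.find n ['.'] = -1
      · rw [if_pos hdot]
        have hninf : ¬ (['.'] <:+: n) := fun hi =>
          (PySem.Chars.find_ne_neg_one_iff n ['.']).mpr hi hdot
        refine (stfdLoopA_eq_web _ _ ?_).symm
        rintro p hp (h | h)
        · exact hnk p hp h
        · exact hninf (List.IsInfix.trans (List.IsPrefix.isInfix ⟨p.1, rfl⟩) (List.IsSuffix.isInfix h))
      · rw [if_neg hdot]
        have h0 : 0 ≤ PySem.Chars.find n ['.'] := by
          have := PySem.Chars.neg_one_le_find n ['.']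
          omega
        obtain ⟨hsplit, hnodot, hdlt⟩ := stfd_find_split n hdot
        set d := (PySem.Chars.find n ['.']).toNat with hdef
        have hslice : PySem.List.slice n (some (PySem.Chars.find n ['.'] + 1)) none
            = n.drop (d + 1) := by
          rw [PySem.List.slice_from n (show (0:Int) ≤ PySem.Chars.find n ['.'] + 1 by omega)]
          congr 1
          omega
        rw [hslice]
        have hlt : (n.drop (d + 1)).length < fuel := by
          simp only [List.length_drop]
          omega
        rw [ih _ hlt]
        refine (stfdLoopA_congr stfdTable n (n.drop (d + 1)) ?_).symm
        intro p hp
        conv_lhs => rw [hsplit]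
        exact stfdMatch_drop_label _ _ _ hnodot (hsplit ▸ hnk p hp)

-- ===== VERDICT (by name: the statement is the Claim_ definition above) =====
theorem source_target_from_domain_py_spec : Claim_equal_source_target_from_domain_py := by
  intro domain _
  unfold Spec_source_target_from_domain_py source_target_from_domain_py source_target_from_domain_py_alt
  by_cases h : PySem.Chars.lower (PySem.Chars.strip domain.toList) = []
  · rw [h]
    rw [stfdLoopB]
    simp
  · rw [if_neg h, stfdLoop_eq _ _ (by omega)]
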